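-- pv_equiv track=rewrite | github.com/Arsen1302/Code-copy-detector | TestData/solutions/problem_1254_4.py | solution_1254_4
-- ===== SOURCE A (Python) =====
-- def solution_1254_4(s: str) -> str:
--     res = ""
--     for index, char in enumerate(s):
--
--         # for each odd number
--         if index % 2 != 0 and index != 0:
--
--             # get the previous character
--             previous_ord = ord(s[index-1])
--
--             # get the current character
--             # by summing ordinal of previous and current number
--             this = previous_ord + int(char)
--
--             # append the chr of the ordinal back to result
--             res += chr(this)
--         else:
--             res += char
--     return res
-- ===== SOURCE B (Python) =====
-- def solution_1254_4(s: str) -> str: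
--     out = []
--     it = iter(s)
--     for a in it:
--         b = next(it, None)
--         out.append(a)
--         if b is not None:
--             out.append(chr(ord(a) + int(b)))
--     return "".join(out)
-- ===== Notes on version B (the rewrite author's own statement) =====
-- stated objective: alternative
-- what changed: B consumes the string pairwise through an iterator (even char + following odd char), computing each shifted char from the pair directly, instead of A's enumerate loop with a parity test and a backward index lookup s[index-1].
import Mathlib
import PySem

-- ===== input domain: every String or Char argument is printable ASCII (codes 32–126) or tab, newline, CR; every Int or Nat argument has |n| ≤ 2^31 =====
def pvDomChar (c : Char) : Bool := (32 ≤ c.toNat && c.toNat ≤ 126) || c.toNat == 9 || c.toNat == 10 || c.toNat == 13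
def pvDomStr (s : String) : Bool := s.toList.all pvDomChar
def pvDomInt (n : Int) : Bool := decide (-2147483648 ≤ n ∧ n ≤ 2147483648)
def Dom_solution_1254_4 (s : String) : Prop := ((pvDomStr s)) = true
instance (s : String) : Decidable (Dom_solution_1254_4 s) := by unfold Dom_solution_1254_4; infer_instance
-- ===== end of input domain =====

-- B replaces A's enumerate loop (parity test + backward lookup s[index-1]) by a pairwise
-- iterator pass over consecutive (even, odd) characters; alternative decomposition, same cost.

-- ===== PORT A =====
-- body of A's loop: res += chr(ord(s[index-1]) + int(char)) on odd index, else res += char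
def pvStepA (xs : List Char) (res : List Char) (ic : Int × Char) : List Char :=
  if PySem.Int.mod ic.1 2 != 0 && ic.1 != 0 then
    let previous_ord : Int := ((PySem.List.pyGetD xs (ic.1 - 1) ' ').toNat : Int)
    let t : Int := previous_ord + (PySem.Int.ofChars? [ic.2]).getD 0
    res ++ [Char.ofNat t.toNat]
  else res ++ [ic.2]

def solution_1254_4 (s : String) : String :=
  String.ofList ((PySem.List.enumerate s.toList 0).foldl (pvStepA s.toList) [])

-- ===== PORT B =====
-- out.append(a); out.append(chr(ord(a) + int(b)))  for each iterator pair (a, b)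
def pvGoB : List Char → List Char
  | [] => []
  | [a] => [a]
  | a :: b :: t =>
      a :: Char.ofNat ((a.toNat : Int) + (PySem.Int.ofChars? [b]).getD 0).toNat :: pvGoB t

def solution_1254_4_alt (s : String) : String := String.ofList (pvGoB s.toList)

-- ===== PRECONDITION & SPEC =====
-- Pre_: every odd-index character is an ASCII digit — exactly where Python A's int(char) returns
-- instead of raising ValueError.
def Pre_solution_1254_4 (s : String) : Prop :=
  ∀ i < s.toList.length, i % 2 = 1 → (s.toList.getD i ' ').isDigit = true
instance (s : String) : Decidable (Pre_solution_1254_4 s) := by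
  unfold Pre_solution_1254_4; infer_instance
def pvWitness_solution_1254_4 : String := "a1"

def Spec_solution_1254_4 (s : String) (out : String) : Prop := out = solution_1254_4_alt s
instance (s : String) (out : String) : Decidable (Spec_solution_1254_4 s out) := by
  unfold Spec_solution_1254_4; infer_instance

-- ===== CLAIM (what is proved, stated in full; the proofs are below) =====
def Claim_equal_solution_1254_4 : Prop :=
  ∀ (s : String), Dom_solution_1254_4 s → Pre_solution_1254_4 s →
    Spec_solution_1254_4 s (solution_1254_4 s)

-- ===== LEMMAS AND PROOFS =====

-- A's fold over enumerate, started at an even offset k with the processed prefix in res,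
-- appends exactly pvGoB of the remaining suffix.
lemma pvFoldA_eq_goB (cs : List Char) : ∀ (xs : List Char) (k : Nat), k % 2 = 0 →
    xs.drop k = cs → ∀ res : List Char,
    (PySem.List.enumerate cs (k : Int)).foldl (pvStepA xs) res = res ++ pvGoB cs := by
  induction cs using pvGoB.induct with
  | case1 =>
      intro xs k _ _ res
      simp [PySem.List.enumerate, pvGoB]
  | case2 a =>
      intro xs k hk _ res
      have hno : ¬((k : Int) % 2 = 1) := by omega
      simp [PySem.List.enumerate_cons, PySem.List.enumerate_nil, pvGoB, pvStepA, hno]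
  | case3 a b t ih =>
      intro xs k hk hdrop res
      have hget? : xs[k]? = some a := by
        have h : (List.drop k xs)[0]? = xs[k + 0]? := List.getElem?_drop
        rw [hdrop] at h
        simpa using h.symm
      have hno : ¬((k : Int) % 2 = 1) := by omega
      have hy1 : ((k : Int) + 1) % 2 = 1 := by omega
      have hy2 : ((k : Int) + 1) ≠ 0 := by omega
      rw [PySem.List.enumerate_cons, List.foldl_cons,
          PySem.List.enumerate_cons, List.foldl_cons]
      have hstep1 : pvStepA xs res ((k : Int), a) = res ++ [a] := by
        simp [pvStepA, hno]
      have hstep2 : pvStepA xs (res ++ [a]) ((k : Int) + 1, b)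
          = res ++ [a, Char.ofNat ((a.toNat : Int) + (PySem.Int.ofChars? [b]).getD 0).toNat] := by
        simp [pvStepA, hy1, hy2, hget?]
      rw [hstep1, hstep2]
      have hdrop2 : xs.drop (k + 2) = t := by
        have h2 : xs.drop (k + 2) = (xs.drop k).drop 2 := by
          rw [List.drop_drop]
        rw [h2, hdrop]
        rfl
      have hcast : ((k : Int) + 1) + 1 = ((k + 2 : Nat) : Int) := by push_cast; ring
      rw [hcast, ih xs (k + 2) (by omega) hdrop2]
      simp [pvGoB]

-- ===== VERDICT (by name: the statement is the Claim_ definition above) =====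
theorem solution_1254_4_spec : Claim_equal_solution_1254_4 := by
  intro s _ _
  unfold Spec_solution_1254_4 solution_1254_4 solution_1254_4_alt
  have h := pvFoldA_eq_goB s.toList s.toList 0 rfl (by simp) []
  simpa using congrArg String.ofList h
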